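-- pv_equiv track=rewrite | github.com/Enigma11-DH/VideoTurbo | python/utils/json_utils.py | _repair_strip_explanatory_text
-- ===== SOURCE A (Python) =====
-- def _repair_strip_explanatory_text(text: str) -> str:
--     """Remove common explanatory text before/after JSON."""
--     lines = text.split('\n')
--
--     start_idx = 0
--     end_idx = len(lines)
--
--     # Find first line that looks like JSON start
--     for i, line in enumerate(lines):
--         stripped = line.strip()
--         if stripped.startswith(('{', '[')):
--             start_idx = i
--             break
--
--     # Find last line that looks like JSON end
--     for i in range(len(lines) - 1, -1, -1):
--         stripped = lines[i].strip()
--         if stripped.endswith(('}', ']')):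
--             end_idx = i + 1
--             break
--
--     return '\n'.join(lines[start_idx:end_idx])
-- ===== SOURCE B (Python) =====
-- def _repair_strip_explanatory_text(text: str) -> str:
--     """Remove common explanatory text before/after JSON (single forward pass)."""
--     lines = text.split('\n')
--     start_idx = None
--     end_idx = len(lines)
--     for i, line in enumerate(lines):
--         stripped = line.strip()
--         if start_idx is None and stripped.startswith(('{', '[')):
--             start_idx = i
--         if stripped.endswith(('}', ']')):
--             end_idx = i + 1
--     return '\n'.join(lines[(start_idx if start_idx is not None else 0):end_idx])
-- ===== Notes on version B (the rewrite author's own statement) =====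
-- stated objective: alternative
-- what changed: Replaces A's two separate scans (a forward scan breaking at the first JSON-start line and a backward index scan breaking at the last JSON-end line) with one combined forward pass that records the first start match in an Option and keeps overwriting the end index on every end match.
import Mathlib
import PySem

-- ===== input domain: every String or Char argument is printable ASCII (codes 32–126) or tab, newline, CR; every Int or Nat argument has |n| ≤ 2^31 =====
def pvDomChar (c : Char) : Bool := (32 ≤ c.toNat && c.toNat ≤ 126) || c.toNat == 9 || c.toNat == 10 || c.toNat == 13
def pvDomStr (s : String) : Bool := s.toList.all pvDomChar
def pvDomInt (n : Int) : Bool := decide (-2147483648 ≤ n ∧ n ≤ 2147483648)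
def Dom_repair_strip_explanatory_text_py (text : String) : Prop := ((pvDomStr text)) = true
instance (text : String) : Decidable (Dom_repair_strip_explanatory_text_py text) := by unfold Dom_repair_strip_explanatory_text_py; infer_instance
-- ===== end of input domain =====

-- B replaces A's forward scan + backward scan by a single forward pass keeping
-- (first start-match index : Option, last end-match index + 1); same O(n) cost, one traversal.

-- ===== PORT A =====
-- shared predicates: stripped line starts with '{'/'[' resp. ends with '}'/']'
def pvStartsP (l : String) : Bool :=
  let s := PySem.Str.strip l
  PySem.Str.startswith s "{" || PySem.Str.startswith s "["

def pvEndsP (l : String) : Bool :=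
  let s := PySem.Str.strip l
  PySem.Str.endswith s "}" || PySem.Str.endswith s "]"

-- A's first loop: forward scan, break on first match; start_idx stays 0 if none
def pvAFindStart : List String → Nat → Nat
  | [], _ => 0
  | l :: rest, i => if pvStartsP l then i else pvAFindStart rest (i + 1)

-- A's second loop: i = k-1 down to 0, break on first match; end_idx stays len if none
-- (lines.getD k "" is exact: Python's lines[i] with 0 ≤ i < len(lines))
def pvAFindEnd (lines : List String) : Nat → Nat
  | 0 => lines.length
  | k + 1 => if pvEndsP (lines.getD k "") then k + 1 else pvAFindEnd lines k

def repair_strip_explanatory_text_py (text : String) : String :=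
  let lines := (PySem.Str.split? text "\n").getD []
  let start_idx := pvAFindStart lines 0
  let end_idx := pvAFindEnd lines lines.length
  PySem.Str.join "\n" (PySem.List.slice lines (some (start_idx : Int)) (some (end_idx : Int)))

-- ===== PORT B =====
-- B's single forward pass over enumerate(lines), state (start_idx : Option, end_idx)
def pvBLoop : List String → Nat → Option Nat × Nat → Option Nat × Nat
  | [], _, st => st
  | l :: rest, i, (s, e) =>
      pvBLoop rest (i + 1)
        (if s.isNone && pvStartsP l then some i else s,
         if pvEndsP l then i + 1 else e)

def repair_strip_explanatory_text_py_alt (text : String) : String :=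
  let lines := (PySem.Str.split? text "\n").getD []
  let st := pvBLoop lines 0 (none, lines.length)
  PySem.Str.join "\n" (PySem.List.slice lines (some ((st.1.getD 0 : Nat) : Int)) (some ((st.2 : Nat) : Int)))

-- ===== PRECONDITION & SPEC =====
def Spec_repair_strip_explanatory_text_py (text : String) (out : String) : Prop := out = repair_strip_explanatory_text_py_alt text
instance (text : String) (out : String) : Decidable (Spec_repair_strip_explanatory_text_py text out) := by unfold Spec_repair_strip_explanatory_text_py; infer_instance

-- ===== CLAIM (what is proved, stated in full; the proofs are below) =====
def Claim_equal_repair_strip_explanatory_text_py : Prop := ∀ (text : String), Dom_repair_strip_explanatory_text_py text → Spec_repair_strip_explanatory_text_py text (repair_strip_explanatory_text_py text)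

-- ===== LEMMAS AND PROOFS =====

-- index of the last element satisfying pvEndsP (proof-side characterisation)
def pvLastIdx : List String → Option Nat
  | [] => none
  | l :: rest =>
      match pvLastIdx rest with
      | some j => some (j + 1)
      | none => if pvEndsP l then some 0 else none

theorem pvBLoop_fst_some (ls : List String) : ∀ (i j e : Nat),
    (pvBLoop ls i (some j, e)).1 = some j := by
  induction ls with
  | nil => intro i j e; rfl
  | cons l rest ih =>
      intro i j e
      simp [pvBLoop, ih]

theorem pvBLoop_fst_none (ls : List String) : ∀ (i e : Nat),
    (pvBLoop ls i (none, e)).1 = (ls.findIdx? pvStartsP).map (· + i) := by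
  induction ls with
  | nil => intro i e; rfl
  | cons l rest ih =>
      intro i e
      by_cases h : pvStartsP l
      · simp [pvBLoop, h, List.findIdx?_cons, pvBLoop_fst_some]
      · simp only [pvBLoop, h, Bool.and_false, Option.isNone_none, Bool.true_and,
          Bool.false_eq_true, if_false]
        rw [ih]
        simp [List.findIdx?_cons, h, Option.map_map, Function.comp]
        rcases rest.findIdx? pvStartsP with _ | j <;> simp <;> omega

theorem pvAFindStart_eq (ls : List String) : ∀ (i : Nat),
    pvAFindStart ls i = (((ls.findIdx? pvStartsP).map (· + i)).getD 0) := by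
  induction ls with
  | nil => intro i; rfl
  | cons l rest ih =>
      intro i
      by_cases h : pvStartsP l
      · simp [pvAFindStart, h, List.findIdx?_cons]
      · simp only [pvAFindStart, h, if_false]
        rw [ih]
        simp [List.findIdx?_cons, h, Option.map_map, Function.comp]
        rcases rest.findIdx? pvStartsP with _ | j <;> simp <;> omega

theorem pvBLoop_snd (ls : List String) : ∀ (i : Nat) (st : Option Nat × Nat),
    (pvBLoop ls i st).2 = match pvLastIdx ls with
      | some j => i + j + 1
      | none => st.2 := by
  induction ls with
  | nil => intro i st; rfl
  | cons l rest ih =>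
      intro i st
      obtain ⟨s, e⟩ := st
      simp only [pvBLoop]
      rw [ih]
      by_cases h : pvEndsP l <;>
        rcases hr : pvLastIdx rest with _ | j <;>
        simp [pvLastIdx, hr, h] <;> omega

theorem pvLastIdx_append (xs : List String) (x : String) :
    pvLastIdx (xs ++ [x]) = if pvEndsP x then some xs.length else pvLastIdx xs := by
  induction xs with
  | nil => simp [pvLastIdx]
  | cons l rest ih =>
      simp only [List.cons_append, pvLastIdx, ih]
      by_cases h : pvEndsP x <;> simp [h]

theorem pvAFindEnd_eq (lines : List String) : ∀ (k : Nat), k ≤ lines.length →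
    pvAFindEnd lines k = match pvLastIdx (lines.take k) with
      | some j => j + 1
      | none => lines.length := by
  intro k
  induction k with
  | zero => intro _; simp [pvAFindEnd, pvLastIdx]
  | succ k ih =>
      intro hk
      have hklt : k < lines.length := by omega
      have htake : lines.take (k + 1) = lines.take k ++ [lines[k]?.getD ""] := by
        rw [List.take_add_one]
        simp [List.getElem?_eq_getElem hklt]
      have hlen : (lines.take k).length = k := by simp [Nat.min_eq_left (Nat.le_of_lt hklt)]
      simp only [pvAFindEnd, List.getD]
      rw [htake, pvLastIdx_append, hlen]
      by_cases h : pvEndsP (lines[k]?.getD "")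
      · simp [h]
      · simp only [h, Bool.false_eq_true, if_false]
        exact ih (by omega)

-- ===== VERDICT (by name: the statement is the Claim_ definition above) =====
theorem repair_strip_explanatory_text_py_spec : Claim_equal_repair_strip_explanatory_text_py := by
  unfold Claim_equal_repair_strip_explanatory_text_py
  intro text _
  unfold Spec_repair_strip_explanatory_text_py
  unfold repair_strip_explanatory_text_py repair_strip_explanatory_text_py_alt
  set lines := (PySem.Str.split? text "\n").getD [] with hlines
  have hstart : pvAFindStart lines 0
      = ((pvBLoop lines 0 (none, lines.length)).1.getD 0) := by
    rw [pvAFindStart_eq, pvBLoop_fst_none]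
  have hend : pvAFindEnd lines lines.length
      = (pvBLoop lines 0 (none, lines.length)).2 := by
    rw [pvAFindEnd_eq lines lines.length le_rfl, pvBLoop_snd]
    simp only [List.take_length]
    rcases pvLastIdx lines with _ | j <;> simp
  simp only [hstart, hend]
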